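-- pv_equiv track=rewrite | github.com/programflow/100_days_of_code | Day 42/daily_exercises/group_non_consecutive_duplicates.py | group_all_duplicates
-- ===== SOURCE A (Python) =====
-- def group_all_duplicates(lst):
--     """Groups all items with the same value into sublists, regardless of position, while preserving the order of first appearance."""
--     result = []
--
--     for item in lst:
--         if not result:
--             result.append([item])
--
--         else:
--             in_a_group = False
--             for group in result:
--                 if item in group:
--                     in_a_group = True
--                     group.append(item)
--                     break # Stop searching after we found the match
--             if not in_a_group:
--                 result.append([item])
--
--
--     return result
-- ===== SOURCE B (Python) =====
-- def group_all_duplicates(lst):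
--     """Groups all items with the same value into sublists, regardless of position, while preserving the order of first appearance."""
--     counts = {}
--     for item in lst:
--         counts[item] = counts.get(item, 0) + 1
--     return [[key] * count for key, count in counts.items()]
-- ===== Notes on version B (the rewrite author's own statement) =====
-- stated objective: faster
-- what changed: Replaces the nested scan over existing groups by a single counting pass over an insertion-ordered dict, then rebuilds each group as key repeated count times.
import Mathlib
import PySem

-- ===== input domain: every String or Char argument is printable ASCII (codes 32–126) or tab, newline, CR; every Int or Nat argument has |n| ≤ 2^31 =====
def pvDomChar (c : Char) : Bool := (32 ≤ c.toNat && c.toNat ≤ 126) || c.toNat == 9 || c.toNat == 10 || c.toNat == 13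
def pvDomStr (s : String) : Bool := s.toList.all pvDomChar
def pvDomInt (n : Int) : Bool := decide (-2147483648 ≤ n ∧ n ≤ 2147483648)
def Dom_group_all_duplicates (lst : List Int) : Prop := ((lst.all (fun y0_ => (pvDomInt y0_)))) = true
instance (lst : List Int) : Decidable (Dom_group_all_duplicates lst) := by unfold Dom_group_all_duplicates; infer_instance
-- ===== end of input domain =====

-- B replaces A's nested scan over existing groups by a single counting pass over an
-- insertion-ordered dict, rebuilding each group as its key repeated count times (objective: faster).

-- ===== PORT A =====
-- inner 'for group in result: if item in group: group.append(item); break' — returns the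
-- updated group list on a hit, none when no group contains item
def pvInnerA (item : Int) : List (List Int) → Option (List (List Int))
  | [] => none
  | g :: gs =>
      if item ∈ g then some ((g ++ [item]) :: gs)
      else (pvInnerA item gs).map (fun r => g :: r)

def pvStepA (result : List (List Int)) (item : Int) : List (List Int) :=
  if result = [] then result ++ [[item]]
  else
    match pvInnerA item result with
    | some r => r            -- in_a_group = True
    | none => result ++ [[item]]

def group_all_duplicates (lst : List Int) : List (List Int) :=
  lst.foldl pvStepA []

-- ===== PORT B =====
def group_all_duplicates_alt (lst : List Int) : List (List Int) :=
  let counts := lst.foldl (fun d x => d.insert x (d.getD x 0 + 1)) (PySem.Dict.empty : PySem.Dict Int Int)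
  counts.items.map (fun p => List.replicate p.2.toNat p.1)

-- ===== PRECONDITION & SPEC =====
def Spec_group_all_duplicates (lst : List Int) (out : List (List Int)) : Prop := out = group_all_duplicates_alt lst
instance (lst : List Int) (out : List (List Int)) : Decidable (Spec_group_all_duplicates lst out) := by unfold Spec_group_all_duplicates; infer_instance

-- ===== CLAIM (what is proved, stated in full; the proofs are below) =====
def Claim_equal_group_all_duplicates : Prop := ∀ (lst : List Int), Dom_group_all_duplicates lst → Spec_group_all_duplicates lst (group_all_duplicates lst)

-- ===== LEMMAS AND PROOFS =====

-- canonical state: groups for the distinct keys of p, in first-appearance order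
def pvRep (p : List Int) : List (List Int) :=
  (PySem.Set.ofList p).map (fun k => List.replicate (p.count k) k)

lemma pvInnerA_rep (x : Int) (keys : List Int) (cnt : Int → Nat)
    (hpos : ∀ k ∈ keys, 1 ≤ cnt k) (hnd : keys.Nodup) :
    pvInnerA x (keys.map (fun k => List.replicate (cnt k) k)) =
      if x ∈ keys then
        some (keys.map (fun k => List.replicate (if k = x then cnt k + 1 else cnt k) k))
      else none := by
  induction keys with
  | nil => simp [pvInnerA]
  | cons k ks ih =>
      have hk1 : 1 ≤ cnt k := hpos k (by simp)
      by_cases hxk : x = k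
      · subst hxk
        have hx1 : x ∈ List.replicate (cnt x) x := by
          rw [List.mem_replicate]; exact ⟨by omega, rfl⟩
        have htail : List.map (fun k => List.replicate (if k = x then cnt k + 1 else cnt k) k) ks
            = List.map (fun k => List.replicate (cnt k) k) ks :=
          List.map_congr_left (fun a ha => by
            have hax : a ≠ x := by rintro rfl; exact (List.nodup_cons.mp hnd).1 ha
            simp [hax])
        simp [pvInnerA, hx1, htail, List.replicate_succ']
      · have hx0 : x ∉ List.replicate (cnt k) k := by
          rw [List.mem_replicate]; rintro ⟨-, rfl⟩; exact hxk rfl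
        have hrec := ih (fun a ha => hpos a (List.mem_cons_of_mem _ ha)) (List.nodup_cons.mp hnd).2
        by_cases hxs : x ∈ ks
        · simp [pvInnerA, hx0, hrec, hxs, hxk, Ne.symm hxk]
        · simp [pvInnerA, hx0, hrec, hxs, hxk]

lemma pvStepA_rep (p : List Int) (x : Int) :
    pvStepA (pvRep p) x = pvRep (p ++ [x]) := by
  have hpos : ∀ k ∈ PySem.Set.ofList p, 1 ≤ p.count k := fun k hk =>
    List.one_le_count_iff.mpr ((PySem.Set.mem_ofList p k).mp hk)
  have hnd : (PySem.Set.ofList p).Nodup := PySem.Set.nodup_ofList p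
  have hinner : pvInnerA x ((PySem.Set.ofList p).map (fun k => List.replicate (p.count k) k)) =
      if x ∈ PySem.Set.ofList p then
        some ((PySem.Set.ofList p).map
          (fun k => List.replicate (if k = x then p.count k + 1 else p.count k) k))
      else none :=
    pvInnerA_rep x (PySem.Set.ofList p) (fun k => p.count k) hpos hnd
  by_cases hxp : x ∈ p
  · have hxkeys : x ∈ PySem.Set.ofList p := (PySem.Set.mem_ofList p x).mpr hxp
    have hne : pvRep p ≠ [] := by
      unfold pvRep; intro h
      rw [List.map_eq_nil_iff] at h
      rw [h] at hxkeys
      exact absurd hxkeys (by simp)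
    have hkeys : PySem.Set.ofList (p ++ [x]) = PySem.Set.ofList p := by
      rw [PySem.Set.ofList_append_singleton, PySem.Set.add_of_mem hxkeys]
    unfold pvStepA
    rw [if_neg hne]
    unfold pvRep
    rw [hinner, if_pos hxkeys, hkeys]
    simp only []
    apply List.map_congr_left
    intro a ha
    by_cases hax : a = x
    · subst hax; simp [List.count_append]
    · simp [List.count_append, hax, Ne.symm hax]
  · have hxkeys : x ∉ PySem.Set.ofList p := fun h => hxp ((PySem.Set.mem_ofList p x).mp h)
    have hkeys : PySem.Set.ofList (p ++ [x]) = PySem.Set.ofList p ++ [x] := by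
      rw [PySem.Set.ofList_append_singleton, PySem.Set.add_of_not_mem hxkeys]
    have hcx : p.count x = 0 := List.count_eq_zero_of_not_mem hxp
    have hmaps : (PySem.Set.ofList p).map (fun k => List.replicate ((p ++ [x]).count k) k)
        = (PySem.Set.ofList p).map (fun k => List.replicate (p.count k) k) := by
      apply List.map_congr_left
      intro a ha
      have hax : a ≠ x := by rintro rfl; exact hxkeys ha
      simp [List.count_append, Ne.symm hax]
    by_cases hp : pvRep p = []
    · have hpnil : PySem.Set.ofList p = [] := by
        unfold pvRep at hp
        exact List.map_eq_nil_iff.mp hp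
      rw [show pvStepA (pvRep p) x = pvRep p ++ [[x]] from by unfold pvStepA; rw [if_pos hp], hp]
      simp [pvRep, hkeys, hpnil, List.count_append, hcx]
    · unfold pvStepA
      rw [if_neg hp]
      unfold pvRep
      rw [hinner, if_neg hxkeys, hkeys]
      simp only []
      rw [List.map_append, hmaps]
      simp [List.count_append, List.count_cons, hcx]

lemma pvFoldA_rep (rest p : List Int) :
    rest.foldl pvStepA (pvRep p) = pvRep (p ++ rest) := by
  induction rest generalizing p with
  | nil => simp
  | cons y ys ih =>
      rw [List.foldl_cons, pvStepA_rep, ih]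
      simp

-- ===== VERDICT (by name: the statement is the Claim_ definition above) =====
theorem group_all_duplicates_spec : Claim_equal_group_all_duplicates := by
  intro lst _
  show group_all_duplicates lst = group_all_duplicates_alt lst
  have hA : group_all_duplicates lst = pvRep lst := by
    simpa using pvFoldA_rep lst []
  have hB : group_all_duplicates_alt lst
      = (PySem.Set.ofList lst).map (fun k => List.replicate (lst.count k) k) := by
    unfold group_all_duplicates_alt
    rw [PySem.Dict.foldl_insert_getD_add_one_eq_counter]
    simp [PySem.Dict.items_counter]
  rw [hA, hB]
  rfl
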